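-- pv_equiv track=rewrite | github.com/conganhhcmus/Codelearn.io | sasuke 35/E.py | convert_number_max
-- ===== SOURCE A (Python) =====
-- def convert_number_max(n):
--     s = str(n)
--     max_ = '0'
--     for i in s:
--         if (i > max_): max_ = i
--     res = ''
--     check = True
--     for i in s:
--         if (i != max_ and check):
--             res+=max_
--             check = False
--         else: res+=i
--
--     return int(res)
-- ===== SOURCE B (Python) =====
-- def convert_number_max(n):
--     s = str(n)
--     m = max(s)
--     i = next((k for k, c in enumerate(s) if c != m), None)
--     if i is None:
--         return int(s)
--     return int(s[:i] + m + s[i+1:])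
-- ===== Notes on version B (the rewrite author's own statement) =====
-- stated objective: simpler
-- what changed: Replaces the per-character accumulation loop with a check flag by three direct steps: max(s), the index of the first character differing from it, and a single slice splice.
import Mathlib
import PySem

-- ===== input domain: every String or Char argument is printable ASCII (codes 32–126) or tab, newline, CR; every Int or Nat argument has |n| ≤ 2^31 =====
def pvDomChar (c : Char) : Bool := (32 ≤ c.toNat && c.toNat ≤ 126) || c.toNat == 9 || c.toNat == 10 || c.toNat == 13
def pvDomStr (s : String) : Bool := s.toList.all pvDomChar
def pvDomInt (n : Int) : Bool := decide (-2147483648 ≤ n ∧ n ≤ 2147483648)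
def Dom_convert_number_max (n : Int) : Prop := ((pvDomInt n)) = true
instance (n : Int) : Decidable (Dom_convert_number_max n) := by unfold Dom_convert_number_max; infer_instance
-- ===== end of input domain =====

-- B replaces A's accumulate-with-flag loop by max / first-differing-index / one slice splice (objective: simpler).

-- ===== PORT A =====
-- literal port of A: running-max loop with init '0', then a rebuild loop with a check flag
def convert_number_max (n : Int) : Int :=
  let s := PySem.Int.toChars n
  let max_ := s.foldl (fun m c => if m < c then c else m) '0'
  let r := s.foldl (fun (p : List Char × Bool) c =>
      if c ≠ max_ ∧ p.2 then (p.1 ++ [max_], false) else (p.1 ++ [c], p.2)) (([] : List Char), true)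
  (PySem.Int.ofChars? r.1).getD 0

-- ===== PORT B =====
-- literal port of B: m = max(s); first index with s[k] ≠ m; splice m in by slicing
def convert_number_max_alt (n : Int) : Int :=
  let s := PySem.Int.toChars n
  let m := (PySem.List.max? s (fun c => c)).getD '0'
  match s.findIdx? (fun c => c ≠ m) with
  | none => (PySem.Int.ofChars? s).getD 0
  | some i => (PySem.Int.ofChars? (s.take i ++ m :: s.drop (i + 1))).getD 0

-- ===== PRECONDITION & SPEC =====
def Spec_convert_number_max (n : Int) (out : Int) : Prop := out = convert_number_max_alt n
instance (n : Int) (out : Int) : Decidable (Spec_convert_number_max n out) := by unfold Spec_convert_number_max; infer_instance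

-- ===== CLAIM (what is proved, stated in full; the proofs are below) =====
def Claim_equal_convert_number_max : Prop := ∀ (n : Int), Dom_convert_number_max n → Spec_convert_number_max n (convert_number_max n)

-- ===== LEMMAS AND PROOFS =====

-- every decimal digit character is ≥ '0'
lemma digitChar_ge (d : Nat) (h : d < 10) : '0' ≤ Nat.digitChar d := by
  interval_cases d <;> decide

lemma toDigitsCore_mem (f : Nat) : ∀ (m : Nat) (acc : List Char),
    ∀ c ∈ Nat.toDigitsCore 10 f m acc, c ∈ acc ∨ '0' ≤ c := by
  induction f with
  | zero => intro m acc c hc; exact Or.inl hc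
  | succ f ih =>
    intro m acc c hc
    simp only [Nat.toDigitsCore] at hc
    by_cases h : m / 10 = 0
    · rw [if_pos h] at hc
      rcases List.mem_cons.mp hc with h1 | h1
      · exact Or.inr (h1 ▸ digitChar_ge _ (Nat.mod_lt _ (by norm_num)))
      · exact Or.inl h1
    · rw [if_neg h] at hc
      rcases ih _ _ _ hc with h1 | h1
      · rcases List.mem_cons.mp h1 with h2 | h2
        · exact Or.inr (h2 ▸ digitChar_ge _ (Nat.mod_lt _ (by norm_num)))
        · exact Or.inl h2
      · exact Or.inr h1

lemma toDigitsCore_ne_nil (f : Nat) : ∀ (m : Nat) (acc : List Char),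
    acc ≠ [] → Nat.toDigitsCore 10 f m acc ≠ [] := by
  induction f with
  | zero => intro m acc h; simpa [Nat.toDigitsCore] using h
  | succ f ih =>
    intro m acc _
    simp only [Nat.toDigitsCore]
    by_cases h : m / 10 = 0
    · rw [if_pos h]; simp
    · rw [if_neg h]; exact ih _ _ (by simp)

lemma toDigits_ge (m : Nat) : ∀ c ∈ Nat.toDigits 10 m, '0' ≤ c := by
  intro c hc
  rcases toDigitsCore_mem _ _ _ _ hc with h | h
  · simp at h
  · exact h

lemma toDigits_ne_nil (m : Nat) : Nat.toDigits 10 m ≠ [] := by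
  show Nat.toDigitsCore 10 (m + 1) m [] ≠ []
  simp only [Nat.toDigitsCore]
  by_cases h : m / 10 = 0
  · rw [if_pos h]; simp
  · rw [if_neg h]; exact toDigitsCore_ne_nil _ _ _ (by simp)

-- str(n) is nonempty and contains a character ≥ '0'
lemma toChars_ne_nil (n : Int) : PySem.Int.toChars n ≠ [] := by
  unfold PySem.Int.toChars
  split
  · simp
  · exact toDigits_ne_nil _

lemma toChars_has_digit (n : Int) : ∃ c ∈ PySem.Int.toChars n, '0' ≤ c := by
  unfold PySem.Int.toChars
  split
  · obtain ⟨c, hc⟩ := List.exists_mem_of_ne_nil _ (toDigits_ne_nil n.natAbs)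
    exact ⟨c, List.mem_cons_of_mem _ hc, toDigits_ge _ _ hc⟩
  · obtain ⟨c, hc⟩ := List.exists_mem_of_ne_nil _ (toDigits_ne_nil n.toNat)
    exact ⟨c, hc, toDigits_ge _ _ hc⟩

-- A's running-max step is max
lemma step_eq_max : (fun (m c : Char) => if m < c then c else m) = max := by
  funext a b
  rcases lt_trichotomy a b with h | h | h
  · simp [h, max_eq_right h.le]
  · simp [h]
  · simp [not_lt_of_gt h, max_eq_left h.le]

lemma foldl_max_pull (l : List Char) : ∀ (a b : Char),
    l.foldl max (max a b) = max a (l.foldl max b) := by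
  induction l with
  | nil => intro a b; rfl
  | cons c t ih =>
    intro a b
    simp only [List.foldl_cons, max_assoc, ih]

lemma init_le_foldl_max (l : List Char) : ∀ a : Char, a ≤ l.foldl max a := by
  induction l with
  | nil => intro a; exact le_refl a
  | cons c t ih => intro a; exact le_trans (le_max_left a c) (ih _)

lemma mem_le_foldl_max (l : List Char) : ∀ (a c : Char), c ∈ l → c ≤ l.foldl max a := by
  induction l with
  | nil => intro a c hc; simp at hc
  | cons d t ih =>
    intro a c hc
    rcases List.mem_cons.mp hc with h | h
    · subst h; exact le_trans (le_max_right a c) (init_le_foldl_max t _)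
    · exact ih _ _ h

-- the two max computations agree on str(n)
lemma max_eq (n : Int) :
    (PySem.Int.toChars n).foldl (fun m c => if m < c then c else m) '0'
      = ((PySem.List.max? (PySem.Int.toChars n) (fun c => c)).getD '0') := by
  obtain ⟨h, t, hs⟩ := List.exists_cons_of_ne_nil (toChars_ne_nil n)
  obtain ⟨c, hc, hc0⟩ := toChars_has_digit n
  rw [hs] at hc ⊢
  rw [step_eq_max, PySem.List.max?_id_cons, Option.getD_some, List.foldl_cons,
      foldl_max_pull]
  refine max_eq_right ?_
  rcases List.mem_cons.mp hc with h1 | h1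
  · exact le_trans hc0 (h1 ▸ init_le_foldl_max t h)
  · exact le_trans hc0 (mem_le_foldl_max t h c h1)

-- once the flag is false, the rebuild loop only copies
lemma loop_false (m : Char) (s : List Char) : ∀ acc : List Char,
    s.foldl (fun (p : List Char × Bool) c =>
      if c ≠ m ∧ p.2 then (p.1 ++ [m], false) else (p.1 ++ [c], p.2)) (acc, false)
      = (acc ++ s, false) := by
  induction s with
  | nil => intro acc; simp
  | cons c t ih => intro acc; simp [ih]

-- with the flag true, the rebuild loop produces the splice at the first differing index
lemma loop_true (m : Char) (s : List Char) : ∀ acc : List Char,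
    (s.foldl (fun (p : List Char × Bool) c =>
      if c ≠ m ∧ p.2 then (p.1 ++ [m], false) else (p.1 ++ [c], p.2)) (acc, true)).1
      = acc ++ (match s.findIdx? (fun c => c ≠ m) with
                | none => s
                | some i => s.take i ++ m :: s.drop (i + 1)) := by
  induction s with
  | nil => intro acc; simp
  | cons c t ih =>
    intro acc
    by_cases h : c = m
    · subst h
      simp only [List.foldl_cons, List.findIdx?_cons]
      rw [if_neg (by simp)]
      simp only [decide_not] at *
      rw [if_neg (by simp)]
      rw [ih (acc ++ [c])]
      cases hf : List.findIdx? (fun x => !decide (x = c)) t with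
      | none => simp
      | some i => simp [List.take_succ_cons, List.drop_succ_cons]
    · simp only [List.foldl_cons]
      rw [if_pos (by simp [h])]
      rw [loop_false]
      simp only [List.findIdx?_cons]
      rw [if_pos (by simp [h])]
      simp

-- ===== VERDICT (by name: the statement is the Claim_ definition above) =====
theorem convert_number_max_spec : Claim_equal_convert_number_max := by
  intro n _
  show convert_number_max n = convert_number_max_alt n
  unfold convert_number_max convert_number_max_alt
  simp only []
  rw [max_eq n, loop_true]
  cases hf : (PySem.Int.toChars n).findIdx?
      (fun c => c ≠ ((PySem.List.max? (PySem.Int.toChars n) (fun c => c)).getD '0')) with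
  | none => simp
  | some i => simp
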